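-- pv_equiv track=rewrite | github.com/JiaanL/2023-associate-recruitment-technical | Q1/solution.py | sort_size
-- ===== SOURCE A (Python) =====
-- def sort_size(input_str):
--     size = ['S', 'M', 'L']
--     data_dict = {'S':[], 'M':[], 'L':[]}
--     for i in input_str.split():
--         for j in size:
--             if j in i:
--                 # count X
--                 count = i.count('X')
--                 data_dict[j].append([count, i])
--     for key, value in data_dict.items():
--         data_dict[key] = sorted(value, key=lambda x: x[0], reverse=False)
--     return_list = []
--     for key in size:
--         for size_i in data_dict[key]:
--             return_list.append(size_i[1])
--     return return_list
-- ===== SOURCE B (Python) =====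
-- def sort_size(input_str):
--     flat = []
--     for tok in input_str.split():
--         for rank, sz in enumerate(['S', 'M', 'L']):
--             if sz in tok:
--                 flat.append((rank, tok.count('X'), tok))
--     flat = sorted(flat, key=lambda t: (t[0], t[1]))
--     return [t[2] for t in flat]
-- ===== Notes on version B (the rewrite author's own statement) =====
-- stated objective: alternative
-- what changed: B replaces A's three-key bucket dict with three separate per-bucket sorts by a single flat list of (size_rank, x_count, token) tuples built in one pass and one stable composite-key sort, extracting tokens at the end.
import Mathlib
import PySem

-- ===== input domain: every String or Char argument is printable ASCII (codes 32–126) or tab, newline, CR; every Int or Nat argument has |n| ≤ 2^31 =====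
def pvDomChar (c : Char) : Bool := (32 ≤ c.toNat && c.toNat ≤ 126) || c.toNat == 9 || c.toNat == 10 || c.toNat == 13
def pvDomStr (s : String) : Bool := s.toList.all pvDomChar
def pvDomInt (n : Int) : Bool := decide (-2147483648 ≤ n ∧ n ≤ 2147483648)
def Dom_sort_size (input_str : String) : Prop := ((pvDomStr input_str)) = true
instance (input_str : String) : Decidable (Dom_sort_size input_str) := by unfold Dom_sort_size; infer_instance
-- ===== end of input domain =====

-- B groups tokens by one stable composite-key (size_rank, x_count) sort of a flat tuple list
-- instead of A's bucket dict with three separate sorts; same cost, different decomposition.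

-- ===== PORT A =====
-- data_dict always holds exactly the keys "S","M","L", so `data_dict[j].append(...)` can
-- never raise; `Dict.modify` with default [] is exact here.  The second Python loop
-- iterates data_dict.items() while only overwriting values of existing keys, which keeps
-- the iteration stable, so folding over a snapshot of the items is exact.
def sort_size (input_str : String) : List String :=
  let size : List String := ["S", "M", "L"]
  let data_dict : PySem.Dict String (List (Int × String)) :=
    PySem.Dict.ofList [("S", []), ("M", []), ("L", [])]
  let data_dict := (PySem.Str.split₀ input_str).foldl (fun d i =>
      size.foldl (fun d j =>
        if PySem.Str.isIn j i then
          let count : Int := (PySem.Str.count i "X" : Int)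
          PySem.Dict.modify d j [] (fun v => v ++ [(count, i)])
        else d) d) data_dict
  let data_dict := data_dict.items.foldl (fun d kv =>
      PySem.Dict.insert d kv.1 (PySem.List.sorted kv.2 (fun x => x.1) false)) data_dict
  size.foldl (fun acc key =>
      (PySem.Dict.getD data_dict key []).foldl (fun acc p => acc ++ [p.2]) acc) []

-- ===== PORT B =====
def sort_size_alt (input_str : String) : List String :=
  let flat : List (Int × Int × String) := (PySem.Str.split₀ input_str).foldl (fun acc tok =>
      (PySem.List.enumerate ["S", "M", "L"]).foldl (fun acc rs =>
        if PySem.Str.isIn rs.2 tok then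
          acc ++ [(rs.1, ((PySem.Str.count tok "X" : Int), tok))]
        else acc) acc) []
  let flat := PySem.List.sorted2 flat (fun t => t.1) (fun t => t.2.1) false
  flat.map (fun t => t.2.2)

-- ===== PRECONDITION & SPEC =====
def Spec_sort_size (input_str : String) (out : List String) : Prop := out = sort_size_alt input_str
instance (input_str : String) (out : List String) : Decidable (Spec_sort_size input_str out) := by unfold Spec_sort_size; infer_instance

-- ===== CLAIM (what is proved, stated in full; the proofs are below) =====
def Claim_equal_sort_size : Prop := ∀ (input_str : String), Dom_sort_size input_str → Spec_sort_size input_str (sort_size input_str)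

-- ===== LEMMAS AND PROOFS =====

-- shared abbreviations for the proof
def pvCnt (t : String) : Int := (PySem.Str.count t "X" : Int)

-- comparator of B's composite-key sort (what sorted2's `before` reduces to)
def pvLt2 (a b : Int × Int × String) : Bool :=
  decide (a.1 < b.1) || (!decide (b.1 < a.1) && decide (a.2.1 < b.2.1))

-- comparator of A's per-bucket sort by count
def pvLtC (a b : Int × String) : Bool := decide (a.1 < b.1)

-- tag every pair of a bucket with its size rank
def pvTag (r : Int) (b : List (Int × String)) : List (Int × Int × String) :=
  b.map (fun p => (r, p))

-- the tuples B emits for one token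
def pvG (t : String) : List (Int × Int × String) :=
  (if PySem.Str.isIn "S" t then [((0 : Int), pvCnt t, t)] else []) ++
  (if PySem.Str.isIn "M" t then [((1 : Int), pvCnt t, t)] else []) ++
  (if PySem.Str.isIn "L" t then [((2 : Int), pvCnt t, t)] else [])

-- one token's effect on an (insertion-sorted) bucket for size letter j
def pvStep (j : String) (acc : List (Int × String)) (t : String) : List (Int × String) :=
  if PySem.Str.isIn j t then PySem.List.insertBy pvLtC (pvCnt t, t) acc else acc

-- bucket of size letter j, in A's formulation
def pvBkt (j : String) (toks : List String) : List (Int × String) :=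
  (toks.filter (fun t => PySem.Str.isIn j t)).map (fun t => (pvCnt t, t))

-- j's entries contributed by one token
def pvE (j : String) (t : String) : List (Int × String) :=
  if PySem.Str.isIn j t then [(pvCnt t, t)] else []

theorem pv_insertBy_nil {α : Type} (f : α → α → Bool) (x : α) :
    PySem.List.insertBy f x [] = [x] := rfl

theorem pv_insertBy_cons {α : Type} (f : α → α → Bool) (x y : α) (ys : List α) :
    PySem.List.insertBy f x (y :: ys) =
      if f x y then x :: y :: ys else y :: PySem.List.insertBy f x ys := rfl

-- a rank-0 tuple is lex-inserted inside the rank-0 segment, by count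
theorem pv_ins0 (e : Int × String) (x y z : List (Int × String)) :
    PySem.List.insertBy pvLt2 (0, e) (pvTag 0 x ++ (pvTag 1 y ++ pvTag 2 z))
      = pvTag 0 (PySem.List.insertBy pvLtC e x) ++ (pvTag 1 y ++ pvTag 2 z) := by
  induction x with
  | nil =>
      cases y <;> cases z <;>
        simp [pvTag, pv_insertBy_nil, pv_insertBy_cons, pvLt2]
  | cons a x ih =>
      have h : pvLt2 (0, e) (0, a) = pvLtC e a := by simp [pvLt2, pvLtC]
      cases hb : pvLtC e a <;>
        simp_all [pvTag, pv_insertBy_cons]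

-- a rank-1 tuple skips the rank-0 segment and is inserted inside the rank-1 segment
theorem pv_ins1 (e : Int × String) (x y z : List (Int × String)) :
    PySem.List.insertBy pvLt2 (1, e) (pvTag 0 x ++ (pvTag 1 y ++ pvTag 2 z))
      = pvTag 0 x ++ (pvTag 1 (PySem.List.insertBy pvLtC e y) ++ pvTag 2 z) := by
  induction x with
  | nil =>
      induction y with
      | nil =>
          cases z <;>
            simp [pvTag, pv_insertBy_nil, pv_insertBy_cons, pvLt2]
      | cons b y ihy =>
          have h : pvLt2 (1, e) (1, b) = pvLtC e b := by simp [pvLt2, pvLtC]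
          cases hb : pvLtC e b <;>
            simp_all [pvTag, pv_insertBy_cons]
  | cons a x ih =>
      have h : pvLt2 (1, e) (0, a) = false := by simp [pvLt2]
      simp_all [pvTag, pv_insertBy_cons]

-- a rank-2 tuple skips the rank-0 and rank-1 segments
theorem pv_ins2 (e : Int × String) (x y z : List (Int × String)) :
    PySem.List.insertBy pvLt2 (2, e) (pvTag 0 x ++ (pvTag 1 y ++ pvTag 2 z))
      = pvTag 0 x ++ (pvTag 1 y ++ pvTag 2 (PySem.List.insertBy pvLtC e z)) := by
  induction x with
  | nil =>
      induction y with
      | nil =>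
          induction z with
          | nil => simp [pvTag, pv_insertBy_nil]
          | cons c z ihz =>
              have h : pvLt2 (2, e) (2, c) = pvLtC e c := by simp [pvLt2, pvLtC]
              cases hb : pvLtC e c <;>
                simp_all [pvTag, pv_insertBy_cons]
      | cons b y ihy =>
          have h : pvLt2 (2, e) (1, b) = false := by simp [pvLt2]
          simp_all [pvTag, pv_insertBy_cons]
  | cons a x ih =>
      have h : pvLt2 (2, e) (0, a) = false := by simp [pvLt2]
      simp_all [pvTag, pv_insertBy_cons]

-- B's building loop is a flatMap of pvG
theorem pv_flat (toks : List String) (acc : List (Int × Int × String)) :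
    toks.foldl (fun acc tok =>
        (PySem.List.enumerate ["S", "M", "L"]).foldl (fun acc rs =>
          if PySem.Str.isIn rs.2 tok then
            acc ++ [(rs.1, ((PySem.Str.count tok "X" : Int), tok))]
          else acc) acc) acc
      = acc ++ toks.flatMap pvG := by
  induction toks generalizing acc with
  | nil => simp
  | cons t ts ih =>
      rw [List.foldl_cons]
      have he : PySem.List.enumerate ["S", "M", "L"] = [((0 : Int), "S"), (1, "M"), (2, "L")] := rfl
      have hstep : (PySem.List.enumerate ["S", "M", "L"]).foldl (fun acc rs =>
          if PySem.Str.isIn rs.2 t then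
            acc ++ [(rs.1, ((PySem.Str.count t "X" : Int), t))]
          else acc) acc = acc ++ pvG t := by
        rw [he]
        simp only [List.foldl_cons, List.foldl_nil, pvG, pvCnt]
        split_ifs <;> simp
      rw [hstep, ih]
      simp

-- the composite-key insertion of all of a token list's tuples acts bucketwise
theorem pv_sortloop (toks : List String) (x y z : List (Int × String)) :
    (toks.flatMap pvG).foldl (fun acc e => PySem.List.insertBy pvLt2 e acc)
        (pvTag 0 x ++ (pvTag 1 y ++ pvTag 2 z))
      = pvTag 0 (toks.foldl (pvStep "S") x) ++ (pvTag 1 (toks.foldl (pvStep "M") y)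
          ++ pvTag 2 (toks.foldl (pvStep "L") z)) := by
  induction toks generalizing x y z with
  | nil => simp
  | cons t ts ih =>
      rw [List.flatMap_cons, List.foldl_append]
      have hstep : (pvG t).foldl (fun acc e => PySem.List.insertBy pvLt2 e acc)
          (pvTag 0 x ++ (pvTag 1 y ++ pvTag 2 z))
          = pvTag 0 (pvStep "S" x t) ++ (pvTag 1 (pvStep "M" y t) ++ pvTag 2 (pvStep "L" z t)) := by
        simp only [pvG, pvStep]
        split_ifs <;>
          simp [List.foldl_cons, List.foldl_nil, pv_ins0, pv_ins1, pv_ins2]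
      rw [hstep, ih]
      simp [List.foldl_cons]

-- B's sort is literally the fold of lex insertions
theorem pv_sorted2_eq (l : List (Int × Int × String)) :
    PySem.List.sorted2 l (fun t => t.1) (fun t => t.2.1) false
      = l.foldl (fun acc e => PySem.List.insertBy pvLt2 e acc) [] := rfl

-- A's per-bucket sort is the same fold of count insertions
theorem pv_sortedBkt (j : String) (toks : List String) :
    PySem.List.sorted (pvBkt j toks) (fun x => x.1) false = toks.foldl (pvStep j) [] := by
  rw [PySem.List.sorted_eq_foldl_insertBy]
  unfold pvBkt
  rw [List.foldl_map, ← PySem.List.foldl_if_eq_foldl_filter]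
  rfl

theorem pv_bkt_cons (j t : String) (ts : List String) :
    pvBkt j (t :: ts) = pvE j t ++ pvBkt j ts := by
  simp only [pvBkt, pvE, List.filter_cons]
  split_ifs <;> simp

-- the inner size-loop of A's first loop, on the literal three-key dict
theorem pv_dict_inner (i : String) (x y z : List (Int × String)) :
    (["S", "M", "L"] : List String).foldl (fun d j =>
        if PySem.Str.isIn j i then
          let count : Int := (PySem.Str.count i "X" : Int)
          PySem.Dict.modify d j [] (fun v => v ++ [(count, i)])
        else d) (PySem.Dict.mk [("S", x), ("M", y), ("L", z)])
      = PySem.Dict.mk [("S", x ++ pvE "S" i), ("M", y ++ pvE "M" i), ("L", z ++ pvE "L" i)] := by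
  simp only [List.foldl_cons, List.foldl_nil, pvE, pvCnt]
  split_ifs <;>
    simp [PySem.Dict.modify, PySem.Dict.insert, PySem.Dict.contains, PySem.Dict.getD,
      PySem.Dict.get?, List.find?]

-- A's first loop fills the three buckets
theorem pv_dictA (toks : List String) (x y z : List (Int × String)) :
    toks.foldl (fun d i =>
        (["S", "M", "L"] : List String).foldl (fun d j =>
          if PySem.Str.isIn j i then
            let count : Int := (PySem.Str.count i "X" : Int)
            PySem.Dict.modify d j [] (fun v => v ++ [(count, i)])
          else d) d) (PySem.Dict.mk [("S", x), ("M", y), ("L", z)])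
      = PySem.Dict.mk [("S", x ++ pvBkt "S" toks), ("M", y ++ pvBkt "M" toks),
          ("L", z ++ pvBkt "L" toks)] := by
  induction toks generalizing x y z with
  | nil => simp [pvBkt]
  | cons t ts ih =>
      rw [List.foldl_cons, pv_dict_inner, ih]
      simp [pv_bkt_cons]

-- A's second loop sorts each bucket in place
theorem pv_dictSort (b0 b1 b2 : List (Int × String)) :
    (PySem.Dict.mk [("S", b0), ("M", b1), ("L", b2)]).items.foldl (fun d kv =>
        PySem.Dict.insert d kv.1 (PySem.List.sorted kv.2 (fun x => x.1) false))
        (PySem.Dict.mk [("S", b0), ("M", b1), ("L", b2)])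
      = PySem.Dict.mk [("S", PySem.List.sorted b0 (fun x => x.1) false),
          ("M", PySem.List.sorted b1 (fun x => x.1) false),
          ("L", PySem.List.sorted b2 (fun x => x.1) false)] := by
  simp [List.foldl_cons, PySem.Dict.insert, PySem.Dict.contains]

-- the final projection of the tagged segments
theorem pv_map_tag (r : Int) (b : List (Int × String)) :
    (pvTag r b).map (fun t => t.2.2) = b.map (fun p => p.2) := by
  simp [pvTag]

theorem pv_flatten_singleton {α β : Type} (f : α → β) (l : List α) :
    (l.map (fun x => [f x])).flatten = l.map f := by
  induction l <;> simp_all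

-- ===== VERDICT (by name: the statement is the Claim_ definition above) =====
theorem sort_size_spec : Claim_equal_sort_size := by
  intro input_str _
  show sort_size input_str = sort_size_alt input_str
  simp only [sort_size, sort_size_alt]
  have hof : PySem.Dict.ofList [("S", ([] : List (Int × String))), ("M", []), ("L", [])]
      = PySem.Dict.mk [("S", []), ("M", []), ("L", [])] := rfl
  rw [hof, pv_dictA, pv_flat]
  simp only [List.nil_append]
  rw [pv_dictSort, pv_sorted2_eq]
  have htag : ([] : List (Int × Int × String))
      = pvTag 0 [] ++ (pvTag 1 [] ++ pvTag 2 []) := rfl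
  rw [htag, pv_sortloop]
  simp only [List.foldl_cons, List.foldl_nil, PySem.Dict.getD, PySem.Dict.get?,
    List.find?, List.map_append, pv_map_tag]
  rw [pv_sortedBkt "S", pv_sortedBkt "M", pv_sortedBkt "L"]
  simp [pv_flatten_singleton]
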